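-- pv_equiv track=rewrite | github.com/dirtysalt/codes | leetcode/find-all-good-indices.py | goodIndices
-- ===== SOURCE A (Python) =====
-- from typing import List
--
-- def goodIndices(nums: List[int], k: int) -> List[int]:
--     n = len(nums)
--     left = [0] * n
--     right = [0] * n
--
--     left[0] = 1
--     for i in range(1, n):
--         if nums[i] <= nums[i - 1]:
--             left[i] = left[i - 1] + 1
--         else:
--             left[i] = 1
--
--     right[-1] = 1
--     for i in reversed(range(n - 1)):
--         if nums[i] <= nums[i + 1]:
--             right[i] = right[i + 1] + 1
--         else:
--             right[i] = 1
--
--     ans = []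
--     for i in range(k, n - k):
--         if left[i - 1] >= k and right[i + 1] >= k:
--             ans.append(i)
--     return ans
-- ===== SOURCE B (Python) =====
-- from typing import List
--
-- def goodIndices(nums: List[int], k: int) -> List[int]:
--     n = len(nums)
--     ans = []
--     for i in range(k, n - k):
--         if all(nums[j] <= nums[j - 1] for j in range(i - k + 1, i)) and \
--            all(nums[j] <= nums[j + 1] for j in range(i + 1, i + k)):
--             ans.append(i)
--     return ans
-- ===== Notes on version B (the rewrite author's own statement) =====
-- stated objective: simpler
-- what changed: B removes both precomputed run-length tables (left/right) and instead rescans the k-element non-increasing window before i and non-decreasing window after i directly for each candidate index, in one comprehension-style pass.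
-- outside the precondition, e.g. on goodIndices([], 2): A raises IndexError, B returns []; on goodIndices([3, 1, 2], 0): A raises IndexError, B returns [0, 1, 2]
import Mathlib
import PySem

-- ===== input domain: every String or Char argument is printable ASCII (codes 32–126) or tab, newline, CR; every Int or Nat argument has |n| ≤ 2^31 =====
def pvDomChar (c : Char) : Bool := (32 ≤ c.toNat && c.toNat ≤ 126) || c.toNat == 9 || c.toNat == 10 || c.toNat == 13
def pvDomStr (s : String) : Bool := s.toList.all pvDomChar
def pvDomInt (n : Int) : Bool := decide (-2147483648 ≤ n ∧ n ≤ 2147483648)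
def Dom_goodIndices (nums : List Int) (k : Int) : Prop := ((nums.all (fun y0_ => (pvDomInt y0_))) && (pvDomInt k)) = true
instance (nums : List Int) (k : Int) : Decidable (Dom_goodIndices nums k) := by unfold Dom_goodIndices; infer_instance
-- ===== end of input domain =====

-- B drops A's two precomputed run-length tables and instead rescans the two k-element
-- windows around each candidate index directly (alternative decomposition, O(n*k) vs O(n)).

-- ===== PORT A =====
-- literal transliteration of Source A: build left/right run-length arrays, then one pass
def goodIndices (nums : List Int) (k : Int) : List Int :=
  let n : Int := nums.length
  let left0 : List Int := (List.replicate nums.length (0 : Int)).set 0 1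
  let left : List Int :=
    (PySem.List.pyRange 1 n 1).foldl (fun L i =>
      if PySem.List.pyGetD nums i 0 ≤ PySem.List.pyGetD nums (i - 1) 0 then
        L.set i.toNat (PySem.List.pyGetD L (i - 1) 0 + 1)
      else
        L.set i.toNat 1) left0
  let right0 : List Int := (List.replicate nums.length (0 : Int)).set (nums.length - 1) 1
  let right : List Int :=
    ((PySem.List.pyRange 0 (n - 1) 1).reverse).foldl (fun R i =>
      if PySem.List.pyGetD nums i 0 ≤ PySem.List.pyGetD nums (i + 1) 0 then
        R.set i.toNat (PySem.List.pyGetD R (i + 1) 0 + 1)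
      else
        R.set i.toNat 1) right0
  (PySem.List.pyRange k (n - k) 1).foldl (fun ans i =>
    if k ≤ PySem.List.pyGetD left (i - 1) 0 ∧ k ≤ PySem.List.pyGetD right (i + 1) 0 then
      ans ++ [i]
    else ans) []

-- ===== PORT B =====
-- literal transliteration of Source B: direct window rescans, no tables
def goodIndices_alt (nums : List Int) (k : Int) : List Int :=
  let n : Int := nums.length
  (PySem.List.pyRange k (n - k) 1).foldl (fun ans i =>
    if ((PySem.List.pyRange (i - k + 1) i 1).all fun j =>
          decide (PySem.List.pyGetD nums j 0 ≤ PySem.List.pyGetD nums (j - 1) 0))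
       && ((PySem.List.pyRange (i + 1) (i + k) 1).all fun j =>
          decide (PySem.List.pyGetD nums j 0 ≤ PySem.List.pyGetD nums (j + 1) 0)) then
      ans ++ [i]
    else ans) []

-- ===== PRECONDITION & SPEC =====
-- A raises IndexError on nums = [] (left[0] = 1) and for every k ≤ 0 (right[i+1] with
-- i = n-k-1 ≥ n is reached, since left[i-1] ≥ k always holds for k ≤ 0); Pre_ excludes exactly those.
def Pre_goodIndices (nums : List Int) (k : Int) : Prop := nums ≠ [] ∧ 1 ≤ k
instance (nums : List Int) (k : Int) : Decidable (Pre_goodIndices nums k) := by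
  unfold Pre_goodIndices; infer_instance
def pvWitness_goodIndices : List Int × Int := ([2, 1, 1, 1, 3, 4, 1], 2)

def Spec_goodIndices (nums : List Int) (k : Int) (out : List Int) : Prop := out = goodIndices_alt nums k
instance (nums : List Int) (k : Int) (out : List Int) : Decidable (Spec_goodIndices nums k out) := by unfold Spec_goodIndices; infer_instance

-- ===== CLAIM (what is proved, stated in full; the proofs are below) =====
def Claim_equal_goodIndices : Prop := ∀ (nums : List Int) (k : Int), Dom_goodIndices nums k → Pre_goodIndices nums k → Spec_goodIndices nums k (goodIndices nums k)

-- ===== LEMMAS AND PROOFS =====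

-- run length of the non-increasing run of nums ending at index m (A's left[m])
def lSpec (nums : List Int) : Nat → Int
  | 0 => 1
  | m + 1 => if nums.getD (m + 1) 0 ≤ nums.getD m 0 then lSpec nums m + 1 else 1

-- A's right[n-1-d], by fuel d counted from the right end
def rSpecAux (nums : List Int) (n : Nat) : Nat → Int
  | 0 => 1
  | d + 1 => if nums.getD (n - 1 - (d + 1)) 0 ≤ nums.getD (n - 1 - d) 0 then
               rSpecAux nums n d + 1 else 1

def rSpec (nums : List Int) (n i : Nat) : Int := rSpecAux nums n (n - 1 - i)

theorem one_le_lSpec (nums : List Int) (m : Nat) : 1 ≤ lSpec nums m := by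
  cases m with
  | zero => simp [lSpec]
  | succ m =>
    simp only [lSpec]
    split
    · have := one_le_lSpec nums m; omega
    · omega

theorem one_le_rSpecAux (nums : List Int) (n d : Nat) : 1 ≤ rSpecAux nums n d := by
  cases d with
  | zero => simp [rSpecAux]
  | succ d =>
    simp only [rSpecAux]
    split
    · have := one_le_rSpecAux nums n d; omega
    · omega

theorem rSpec_step (nums : List Int) (n i : Nat) (h : i + 1 ≤ n - 1) :
    rSpec nums n i = if nums.getD i 0 ≤ nums.getD (i + 1) 0 then rSpec nums n (i + 1) + 1 else 1 := by
  unfold rSpec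
  have h1 : n - 1 - i = (n - 1 - (i + 1)) + 1 := by omega
  rw [h1]
  have h2 : n - 1 - ((n - 1 - (i + 1)) + 1) = i := by omega
  have h3 : n - 1 - (n - 1 - (i + 1)) = i + 1 := by omega
  simp only [rSpecAux, h2, h3]

theorem lSpec_ge_iff (nums : List Int) : ∀ (c m : Nat), c ≤ m →
    ((c : Int) + 1 ≤ lSpec nums m ↔
      ∀ t : Nat, t < c → nums.getD (m - t) 0 ≤ nums.getD (m - t - 1) 0) := by
  intro c
  induction c with
  | zero =>
    intro m _
    simp [one_le_lSpec]
  | succ c ih =>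
    intro m hcm
    obtain ⟨m', rfl⟩ : ∃ m', m = m' + 1 := ⟨m - 1, by omega⟩
    simp only [lSpec]
    split
    · rename_i hle
      have := ih m' (by omega)
      constructor
      · intro h t ht
        cases t with
        | zero => simpa using hle
        | succ t =>
          have h2 := (this.mp (by omega)) t (by omega)
          have e1 : m' + 1 - (t + 1) = m' - t := by omega
          have e2 : m' + 1 - (t + 1) - 1 = m' - t - 1 := by omega
          rw [e1]; exact h2
      · intro h
        have : (c : Int) + 1 ≤ lSpec nums m' := by
          rw [this]
          intro t ht
          have h2 := h (t + 1) (by omega)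
          have e1 : m' + 1 - (t + 1) = m' - t := by omega
          have e2 : m' + 1 - (t + 1) - 1 = m' - t - 1 := by omega
          rw [e1] at h2; exact h2
        push_cast
        omega
    · rename_i hle
      constructor
      · intro h; omega
      · intro h
        exfalso
        apply hle
        have h0 := h 0 (by omega)
        simpa using h0
theorem rSpecAux_ge_iff (nums : List Int) (n : Nat) : ∀ (c d : Nat), c ≤ d → d ≤ n - 1 →
    ((c : Int) + 1 ≤ rSpecAux nums n d ↔
      ∀ t : Nat, t < c → nums.getD (n - 1 - d + t) 0 ≤ nums.getD (n - 1 - d + t + 1) 0) := by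
  intro c
  induction c with
  | zero =>
    intro d _ _
    simp [one_le_rSpecAux]
  | succ c ih =>
    intro d hcd hdn
    obtain ⟨d', rfl⟩ : ∃ d', d = d' + 1 := ⟨d - 1, by omega⟩
    simp only [rSpecAux]
    have e0 : n - 1 - (d' + 1) + 1 = n - 1 - d' := by omega
    split
    · rename_i hle
      have := ih d' (by omega) (by omega)
      constructor
      · intro h t ht
        cases t with
        | zero => simpa [e0] using hle
        | succ t =>
          have h2 := (this.mp (by omega)) t (by omega)
          have e1 : n - 1 - (d' + 1) + (t + 1) = n - 1 - d' + t := by omega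
          have e2 : n - 1 - (d' + 1) + (t + 1) + 1 = n - 1 - d' + t + 1 := by omega
          rw [e1]; exact h2
      · intro h
        have : (c : Int) + 1 ≤ rSpecAux nums n d' := by
          rw [this]
          intro t ht
          have h2 := h (t + 1) (by omega)
          have e1 : n - 1 - (d' + 1) + (t + 1) = n - 1 - d' + t := by omega
          have e2 : n - 1 - (d' + 1) + (t + 1) + 1 = n - 1 - d' + t + 1 := by omega
          rw [e1] at h2; exact h2
        push_cast
        omega
    · rename_i hle
      constructor
      · intro h; omega
      · intro h
        exfalso
        apply hle
        have h0 := h 0 (by omega)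
        simpa [e0] using h0

-- the left fold of port A computes lSpec at every processed index
theorem left_fold_spec (nums : List Int) (t : Nat) (ht : t < nums.length) :
    ((PySem.List.pyRange 1 ((t : Int) + 1) 1).foldl (fun L i =>
      if PySem.List.pyGetD nums i 0 ≤ PySem.List.pyGetD nums (i - 1) 0 then
        L.set i.toNat (PySem.List.pyGetD L (i - 1) 0 + 1)
      else
        L.set i.toNat 1) ((List.replicate nums.length (0 : Int)).set 0 1)).length = nums.length ∧
    ∀ j : Nat, j ≤ t →
    ((PySem.List.pyRange 1 ((t : Int) + 1) 1).foldl (fun L i =>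
      if PySem.List.pyGetD nums i 0 ≤ PySem.List.pyGetD nums (i - 1) 0 then
        L.set i.toNat (PySem.List.pyGetD L (i - 1) 0 + 1)
      else
        L.set i.toNat 1) ((List.replicate nums.length (0 : Int)).set 0 1)).getD j 0 = lSpec nums j := by
  induction t with
  | zero =>
    have h0 : PySem.List.pyRange 1 ((0 : Nat) + 1 : Int) 1 = [] := by
      norm_num [PySem.List.pyRange]
    rw [h0]
    constructor
    · simp
    · intro j hj
      interval_cases j
      simp [lSpec, List.getD_eq_getElem?_getD, ht]
  | succ t iht =>
    have hr : PySem.List.pyRange 1 (((t : Nat) + 1 : Int) + 1) 1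
        = PySem.List.pyRange 1 ((t : Int) + 1) 1 ++ [(t : Int) + 1] := by
      exact PySem.List.pyRange_one_succ_right (by omega)
    have hcast : (((t : Nat) + 1 : Nat) : Int) + 1 = ((t : Int) + 1) + 1 := by omega
    rw [hcast, hr, List.foldl_append]
    obtain ⟨ihlen, ihget⟩ := iht (by omega)
    set L := (PySem.List.pyRange 1 ((t : Int) + 1) 1).foldl (fun L i =>
      if PySem.List.pyGetD nums i 0 ≤ PySem.List.pyGetD nums (i - 1) 0 then
        L.set i.toNat (PySem.List.pyGetD L (i - 1) 0 + 1)
      else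
        L.set i.toNat 1) ((List.replicate nums.length (0 : Int)).set 0 1) with hL
    simp only [List.foldl_cons, List.foldl_nil]
    have e1 : ((t : Int) + 1) = ((t + 1 : Nat) : Int) := by push_cast; ring
    simp only [e1]
    have e2' : (((t + 1 : Nat) : Int)) - 1 = ((t : Nat) : Int) := by omega
    simp only [e2', Int.toNat_natCast, PySem.List.pyGetD_natCast]
    rw [ihget t (by omega)]
    have hstep : (if nums.getD (t + 1) 0 ≤ nums.getD t 0 then
        L.set (t + 1) (lSpec nums t + 1) else L.set (t + 1) 1) = L.set (t + 1) (lSpec nums (t + 1)) := by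
      simp only [lSpec]
      split <;> rfl
    rw [hstep]
    refine ⟨by simpa using ihlen, ?_⟩
    intro j hj
    rcases Nat.lt_or_ge j (t + 1) with hlt | hge
    · have hne : t + 1 ≠ j := by omega
      simp [List.getD_eq_getElem?_getD, hne]
      rw [← List.getD_eq_getElem?_getD]
      exact ihget j (by omega)
    · have hje : j = t + 1 := by omega
      rw [hje]
      have hjl : t + 1 < L.length := by omega
      simp [List.getD_eq_getElem?_getD, hjl]

-- the right fold of port A computes rSpec at every index, for any init correct from t up
theorem right_fold_spec (nums : List Int) : ∀ (t : Nat) (R0 : List Int), t ≤ nums.length - 1 →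
    R0.length = nums.length →
    (∀ j : Nat, t ≤ j → j < nums.length → R0.getD j 0 = rSpec nums nums.length j) →
    (((PySem.List.pyRange 0 (t : Int) 1).reverse).foldl (fun R i =>
      if PySem.List.pyGetD nums i 0 ≤ PySem.List.pyGetD nums (i + 1) 0 then
        R.set i.toNat (PySem.List.pyGetD R (i + 1) 0 + 1)
      else
        R.set i.toNat 1) R0).length = nums.length ∧
    ∀ j : Nat, j < nums.length →
    (((PySem.List.pyRange 0 (t : Int) 1).reverse).foldl (fun R i =>
      if PySem.List.pyGetD nums i 0 ≤ PySem.List.pyGetD nums (i + 1) 0 then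
        R.set i.toNat (PySem.List.pyGetD R (i + 1) 0 + 1)
      else
        R.set i.toNat 1) R0).getD j 0 = rSpec nums nums.length j := by
  intro t
  induction t with
  | zero =>
    intro R0 _ hlen hinit
    have h0 : PySem.List.pyRange 0 ((0 : Nat) : Int) 1 = [] := by norm_num [PySem.List.pyRange]
    rw [h0]
    exact ⟨hlen, fun j hj => hinit j (by omega) hj⟩
  | succ t ih =>
    intro R0 hts hlen hinit
    have hr : PySem.List.pyRange 0 ((t + 1 : Nat) : Int) 1
        = PySem.List.pyRange 0 ((t : Nat) : Int) 1 ++ [((t : Nat) : Int)] := by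
      have e : ((t + 1 : Nat) : Int) = ((t : Nat) : Int) + 1 := by push_cast; ring
      rw [e]
      exact PySem.List.pyRange_one_succ_right (by omega)
    rw [hr, List.reverse_append, List.reverse_singleton, List.singleton_append, List.foldl_cons]
    have e1 : ((t : Nat) : Int) + 1 = ((t + 1 : Nat) : Int) := by push_cast; ring
    have ht1 : t + 1 < nums.length := by omega
    have hstep : (if PySem.List.pyGetD nums ((t : Nat) : Int) 0 ≤ PySem.List.pyGetD nums (((t : Nat) : Int) + 1) 0 then
        R0.set ((t : Nat) : Int).toNat (PySem.List.pyGetD R0 (((t : Nat) : Int) + 1) 0 + 1)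
      else
        R0.set ((t : Nat) : Int).toNat 1) = R0.set t (rSpec nums nums.length t) := by
      simp only [e1, Int.toNat_natCast, PySem.List.pyGetD_natCast]
      rw [hinit (t + 1) (by omega) ht1]
      rw [rSpec_step nums nums.length t (by omega)]
      split <;> rfl
    rw [hstep]
    apply ih (R0.set t (rSpec nums nums.length t)) (by omega) (by simpa using hlen)
    intro j hj hjn
    rcases Nat.lt_or_ge t j with hlt | hge
    · have hne : t ≠ j := by omega
      simp only [List.getD_eq_getElem?_getD, List.getElem?_set, if_neg hne]
      rw [← List.getD_eq_getElem?_getD]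
      exact hinit j (by omega) hjn
    · have hje : j = t := by omega
      rw [hje]
      have hjl : t < R0.length := by omega
      simp [List.getD_eq_getElem?_getD, hjl]

-- B's left window scan, as a statement about Nat indices
theorem b_left_iff (nums : List Int) (K m : Nat) (hK : 1 ≤ K) (hKm : K ≤ m) :
    (((PySem.List.pyRange ((m : Int) - (K : Int) + 1) (m : Int) 1).all fun j =>
        decide (PySem.List.pyGetD nums j 0 ≤ PySem.List.pyGetD nums (j - 1) 0)) = true) ↔
    (∀ t : Nat, t < K - 1 → nums.getD (m - 1 - t) 0 ≤ nums.getD (m - 1 - t - 1) 0) := by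
  rw [List.all_eq_true]
  simp only [PySem.List.mem_pyRange_one, decide_eq_true_eq, and_imp]
  constructor
  · intro h t ht
    have hj := h ((m - 1 - t : Nat) : Int) (by omega) (by omega)
    rw [PySem.List.pyGetD_natCast] at hj
    rw [show ((m - 1 - t : Nat) : Int) - 1 = ((m - 1 - t - 1 : Nat) : Int) by omega] at hj
    rw [PySem.List.pyGetD_natCast] at hj
    exact hj
  · intro h j hj1 hj2
    have hj : j = ((j.toNat : Nat) : Int) := by omega
    rw [hj, PySem.List.pyGetD_natCast]
    rw [show ((j.toNat : Nat) : Int) - 1 = ((j.toNat - 1 : Nat) : Int) by omega]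
    rw [PySem.List.pyGetD_natCast]
    have ht := h (m - 1 - j.toNat) (by omega)
    rw [show m - 1 - (m - 1 - j.toNat) = j.toNat by omega] at ht
    exact ht

-- B's right window scan, as a statement about Nat indices
theorem b_right_iff (nums : List Int) (K m : Nat) (hK : 1 ≤ K) :
    (((PySem.List.pyRange ((m : Int) + 1) ((m : Int) + (K : Int)) 1).all fun j =>
        decide (PySem.List.pyGetD nums j 0 ≤ PySem.List.pyGetD nums (j + 1) 0)) = true) ↔
    (∀ t : Nat, t < K - 1 → nums.getD (m + 1 + t) 0 ≤ nums.getD (m + 1 + t + 1) 0) := by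
  rw [List.all_eq_true]
  simp only [PySem.List.mem_pyRange_one, decide_eq_true_eq, and_imp]
  constructor
  · intro h t ht
    have hj := h ((m + 1 + t : Nat) : Int) (by omega) (by omega)
    rw [PySem.List.pyGetD_natCast] at hj
    rw [show ((m + 1 + t : Nat) : Int) + 1 = ((m + 1 + t + 1 : Nat) : Int) by omega] at hj
    rw [PySem.List.pyGetD_natCast] at hj
    exact hj
  · intro h j hj1 hj2
    have hj : j = ((j.toNat : Nat) : Int) := by omega
    rw [hj, PySem.List.pyGetD_natCast]
    rw [show ((j.toNat : Nat) : Int) + 1 = ((j.toNat + 1 : Nat) : Int) by omega]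
    rw [PySem.List.pyGetD_natCast]
    have ht := h (j.toNat - (m + 1)) (by omega)
    rw [show m + 1 + (j.toNat - (m + 1)) = j.toNat by omega] at ht
    exact ht

-- ===== VERDICT (by name: the statement is the Claim_ definition above) =====
theorem goodIndices_spec : Claim_equal_goodIndices := by
  intro nums k _ hpre
  obtain ⟨hne, hk1⟩ := hpre
  have hn1 : 1 ≤ nums.length := by
    cases nums with
    | nil => exact absurd rfl hne
    | cons a l => simp
  obtain ⟨K, rfl⟩ : ∃ K : Nat, k = (K : Int) := ⟨k.toNat, by omega⟩
  have hK1 : 1 ≤ K := by omega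
  unfold Spec_goodIndices goodIndices goodIndices_alt
  apply PySem.List.foldl_congr_mem
  intro acc i hi
  rw [PySem.List.mem_pyRange_one] at hi
  obtain ⟨hiK, hin⟩ := hi
  obtain ⟨m, rfl⟩ : ∃ m : Nat, i = (m : Int) := ⟨i.toNat, by omega⟩
  have hKm : K ≤ m := by omega
  have hmn : m + K < nums.length := by omega
  have hL := left_fold_spec nums (nums.length - 1) (by omega)
  rw [show ((nums.length - 1 : Nat) : Int) + 1 = (nums.length : Int) from by omega] at hL
  have hR := right_fold_spec nums (nums.length - 1)
      ((List.replicate nums.length (0 : Int)).set (nums.length - 1) 1) (by omega) (by simp) ?hinit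
  case hinit =>
    intro j hj hjn
    have hje : j = nums.length - 1 := by omega
    rw [hje]
    have h1 : nums.length - 1 < ((List.replicate nums.length (0 : Int)).length) := by simp; omega
    rw [show rSpec nums nums.length (nums.length - 1) = 1 from by
      unfold rSpec
      rw [show nums.length - 1 - (nums.length - 1) = 0 from by omega]
      rfl]
    simp [List.getD_eq_getElem?_getD, List.getElem?_set]
    rw [if_pos (show 0 < nums.length by omega)]
    rfl
  rw [show ((nums.length - 1 : Nat) : Int) = (nums.length : Int) - 1 from by omega] at hR
  apply if_congr ?_ rfl rfl
  rw [Bool.and_eq_true]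
  apply and_congr
  · -- left condition
    rw [show ((m : Int) - 1) = ((m - 1 : Nat) : Int) from by omega, PySem.List.pyGetD_natCast,
      hL.2 (m - 1) (by omega), b_left_iff nums K m hK1 hKm]
    rw [show ((K : Nat) : Int) = ((K - 1 : Nat) : Int) + 1 from by omega]
    exact lSpec_ge_iff nums (K - 1) (m - 1) (by omega)
  · -- right condition
    have e : ((m : Int) + 1) = ((m + 1 : Nat) : Int) := by omega
    conv_lhs => rw [e, PySem.List.pyGetD_natCast, hR.2 (m + 1) (by omega)]
    rw [b_right_iff nums K m hK1]
    rw [show ((K : Nat) : Int) = ((K - 1 : Nat) : Int) + 1 from by omega]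
    have hr := rSpecAux_ge_iff nums nums.length (K - 1) (nums.length - 1 - (m + 1)) (by omega) (by omega)
    rw [show nums.length - 1 - (nums.length - 1 - (m + 1)) = m + 1 from by omega] at hr
    exact hr
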